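-- pv_equiv track=rewrite | github.com/blackbeardONE/QSDM | scripts/gen_grafana_dashboards.py | _has_top_level_set_op
-- ===== SOURCE A (Python) =====
-- _SET_OPS = ("and", "or", "unless")
--
-- def _has_top_level_set_op(expr: str) -> bool:
--     """Return True iff `and`/`or`/`unless` appears at top level."""
--     depth = 0
--     quote: str | None = None
--     i = 0
--     n = len(expr)
--     while i < n:
--         ch = expr[i]
--         if quote is not None:
--             if ch == "\\" and i + 1 < n:
--                 i += 2
--                 continue
--             if ch == quote:
--                 quote = None
--             i += 1
--             continue
--         if ch in "\"'":
--             quote = ch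
--             i += 1
--             continue
--         if ch in "([{":
--             depth += 1
--             i += 1
--             continue
--         if ch in ")]}":
--             depth -= 1
--             i += 1
--             continue
--         if depth == 0 and (ch.isspace() or i == 0):
--             for op in _SET_OPS:
--                 # Set ops must be whitespace-bounded on both sides
--                 # (PromQL keywords, not identifiers). Check both
--                 # leading boundary (current ch is whitespace, or i==0)
--                 # and trailing boundary (next char is whitespace).
--                 start = i if ch.isspace() else i
--                 # When ch is whitespace, the keyword candidate starts
--                 # at i+1; when i==0, it starts at 0.
--                 kw_start = start + 1 if ch.isspace() else start
--                 if expr.startswith(op, kw_start):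
--                     end = kw_start + len(op)
--                     if end >= n or expr[end].isspace() or expr[end] in "({":
--                         return True
--         i += 1
--     return False
-- ===== SOURCE B (Python) =====
-- _SET_OPS = ("and", "or", "unless")
--
--
-- def _top_level_tokens(expr: str) -> list:
--     """One pass: split `expr` into its top-level whitespace-separated chunks,
--     blanking quoted and bracket-nested characters out with '#'."""
--     tokens = []
--     cur = []
--     depth = 0
--     quote = None
--     esc = False
--     for ch in expr:
--         if quote is not None:
--             if esc:
--                 esc = False
--             elif ch == "\\":
--                 esc = True
--             elif ch == quote:
--                 quote = None
--             cur.append("#")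
--         elif ch in "\"'":
--             quote = ch
--             cur.append(ch)
--         elif ch in "([{":
--             cur.append(ch if depth == 0 else "#")
--             depth += 1
--         elif ch in ")]}":
--             depth -= 1
--             cur.append("#")
--         elif depth == 0 and ch.isspace():
--             if cur:
--                 tokens.append("".join(cur))
--                 cur = []
--         else:
--             cur.append(ch if depth == 0 else "#")
--     if cur:
--         tokens.append("".join(cur))
--     return tokens
--
--
-- def _has_top_level_set_op(expr: str) -> bool:
--     """Return True iff `and`/`or`/`unless` appears at top level."""
--     return any(
--         t == op or (t.startswith(op) and t[len(op)] in "({")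
--         for t in _top_level_tokens(expr)
--         for op in _SET_OPS
--     )
-- ===== Notes on version B (the rewrite author's own statement) =====
-- stated objective: alternative
-- what changed: A's fused index scan with inline multi-keyword startswith lookahead at every top-level boundary is replaced by a two-stage decomposition: one pass tokenizes the expression into top-level whitespace-separated chunks (quoted and bracket-nested characters blanked to '#'), then each token is tested against the set-operator keywords.
import Mathlib
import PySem

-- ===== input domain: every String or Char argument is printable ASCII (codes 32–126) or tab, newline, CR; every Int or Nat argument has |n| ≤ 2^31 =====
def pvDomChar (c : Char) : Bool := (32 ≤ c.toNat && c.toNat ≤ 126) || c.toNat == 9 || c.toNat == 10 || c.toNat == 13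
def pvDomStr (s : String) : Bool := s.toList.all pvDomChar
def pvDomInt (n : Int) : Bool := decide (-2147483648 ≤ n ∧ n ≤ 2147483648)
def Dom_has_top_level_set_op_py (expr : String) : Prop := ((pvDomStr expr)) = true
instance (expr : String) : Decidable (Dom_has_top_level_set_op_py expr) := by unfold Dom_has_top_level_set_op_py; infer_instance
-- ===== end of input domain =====

-- B replaces A's fused index scan (inline keyword lookahead at each top-level space) by a
-- tokenize-then-check decomposition: one pass collects the top-level whitespace-separated
-- chunks (quoted/bracketed chars blanked to '#'), then each token is tested against the
-- keywords (a different decomposition of the same linear scan).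

-- ===== PORT A =====
-- _SET_OPS = ("and", "or", "unless")
def pvSetOps : List (List Char) := [['a','n','d'], ['o','r'], ['u','n','l','e','s','s']]

-- trailing boundary: `end >= n or expr[end].isspace() or expr[end] in "({"` where the
-- argument is the chars from index `end` on (empty list = end >= n): exact.
def pvTrailOK (u : List Char) : Bool :=
  match u with
  | [] => true
  | c :: _ => PySem.Chars.isspace c || c == '(' || c == '{'

-- the inner `for op in _SET_OPS` loop: `expr.startswith(op, kw_start)` on the suffix `cand`
-- starting at kw_start, then the trailing-boundary test; returns at the first success.
def pvCheckOps (cand : List Char) : Bool :=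
  pvSetOps.any fun op => PySem.Chars.startswith cand op && pvTrailOK (cand.drop op.length)

-- A's while-loop over i, ported as recursion on the suffix `expr[i:]`; `isFirst` is `i == 0`.
-- `i += 2` (backslash escape inside a quote with i+1 < n) consumes two chars.
def pvLoopA : List Char → Bool → Int → Option Char → Bool
  | [], _, _, _ => false
  | ch :: rest, isFirst, depth, quote =>
    match quote with
    | some q =>
      if ch == '\\' && !rest.isEmpty then pvLoopA rest.tail false depth (some q)
      else if ch == q then pvLoopA rest false depth none
      else pvLoopA rest false depth (some q)
    | none =>
      if ch == '"' || ch == '\'' then pvLoopA rest false depth (some ch)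
      else if ch == '(' || ch == '[' || ch == '{' then pvLoopA rest false (depth + 1) none
      else if ch == ')' || ch == ']' || ch == '}' then pvLoopA rest false (depth - 1) none
      else if depth == 0 && (PySem.Chars.isspace ch || isFirst) then
        (if pvCheckOps (if PySem.Chars.isspace ch then rest else ch :: rest) then true
         else pvLoopA rest false depth none)
      else pvLoopA rest false depth none
termination_by l _ _ _ => l.length
decreasing_by all_goals (simp [List.length_tail]; try omega)

def has_top_level_set_op_py (expr : String) : Bool :=
  pvLoopA expr.toList true 0 none

-- ===== PORT B =====
-- state of Source B's for-loop: (tokens, cur, depth, quote, esc)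
def pvTokStep (st : List (List Char) × List Char × Int × Option Char × Bool) (ch : Char) :
    List (List Char) × List Char × Int × Option Char × Bool :=
  match st with
  | (tokens, cur, depth, quote, esc) =>
    match quote with
    | some q =>
      if esc then (tokens, cur ++ ['#'], depth, some q, false)
      else if ch == '\\' then (tokens, cur ++ ['#'], depth, some q, true)
      else if ch == q then (tokens, cur ++ ['#'], depth, none, esc)
      else (tokens, cur ++ ['#'], depth, some q, esc)
    | none =>
      if ch == '"' || ch == '\'' then (tokens, cur ++ [ch], depth, some ch, esc)
      else if ch == '(' || ch == '[' || ch == '{' then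
        (tokens, cur ++ [if depth == 0 then ch else '#'], depth + 1, none, esc)
      else if ch == ')' || ch == ']' || ch == '}' then
        (tokens, cur ++ ['#'], depth - 1, none, esc)
      else if depth == 0 && PySem.Chars.isspace ch then
        (if cur.isEmpty then (tokens, [], depth, none, esc)
         else (tokens ++ [cur], [], depth, none, esc))
      else (tokens, cur ++ [if depth == 0 then ch else '#'], depth, none, esc)

-- `t[n] in "({"` via pyGet? (exact; the out-of-range none cannot occur where Source B
-- evaluates it, since the indexing is guarded by `t == op or (t.startswith(op) and ...)`).
def pvBraceAt (t : List Char) (n : Nat) : Bool :=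
  match PySem.Chars.pyGet? t (n : Int) with
  | some c => c == '(' || c == '{'
  | none => false

-- `t == op or (t.startswith(op) and t[len(op)] in "({")`
def pvTokCheck (t : List Char) : Bool :=
  pvSetOps.any fun op => t == op || (PySem.Chars.startswith t op && pvBraceAt t op.length)

def has_top_level_set_op_py_alt (expr : String) : Bool :=
  let st := expr.toList.foldl pvTokStep ([], [], 0, none, false)
  (st.1 ++ (if st.2.1.isEmpty then [] else [st.2.1])).any pvTokCheck

-- ===== PRECONDITION & SPEC =====
def Spec_has_top_level_set_op_py (expr : String) (out : Bool) : Prop := out = has_top_level_set_op_py_alt expr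
instance (expr : String) (out : Bool) : Decidable (Spec_has_top_level_set_op_py expr out) := by unfold Spec_has_top_level_set_op_py; infer_instance

-- ===== CLAIM (what is proved, stated in full; the proofs are below) =====
def Claim_equal_has_top_level_set_op_py : Prop := ∀ (expr : String), Dom_has_top_level_set_op_py expr → Spec_has_top_level_set_op_py expr (has_top_level_set_op_py expr)

-- ===== LEMMAS AND PROOFS =====

-- The first token's contents from scanner state (depth, quote) with an empty current chunk.
def pvChunk : List Char → Int → Option Char → List Char
  | [], _, _ => []
  | ch :: rest, depth, quote =>
    match quote with
    | some q =>
      if ch == '\\' && !rest.isEmpty then '#' :: '#' :: pvChunk rest.tail depth (some q)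
      else if ch == q then '#' :: pvChunk rest depth none
      else '#' :: pvChunk rest depth (some q)
    | none =>
      if ch == '"' || ch == '\'' then ch :: pvChunk rest depth (some ch)
      else if ch == '(' || ch == '[' || ch == '{' then
        (if depth == 0 then ch else '#') :: pvChunk rest (depth + 1) none
      else if ch == ')' || ch == ']' || ch == '}' then '#' :: pvChunk rest (depth - 1) none
      else if depth == 0 && PySem.Chars.isspace ch then []
      else (if depth == 0 then ch else '#') :: pvChunk rest depth none
termination_by l _ _ => l.length
decreasing_by all_goals (simp [List.length_tail]; try omega)

-- Recursive form of B's tokenizer (escape pairs consumed two chars at a time).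
def pvTks : List Char → List Char → Int → Option Char → List (List Char)
  | [], cur, _, _ => if cur.isEmpty then [] else [cur]
  | ch :: rest, cur, depth, quote =>
    match quote with
    | some q =>
      if ch == '\\' && !rest.isEmpty then pvTks rest.tail (cur ++ ['#', '#']) depth (some q)
      else if ch == q then pvTks rest (cur ++ ['#']) depth none
      else pvTks rest (cur ++ ['#']) depth (some q)
    | none =>
      if ch == '"' || ch == '\'' then pvTks rest (cur ++ [ch]) depth (some ch)
      else if ch == '(' || ch == '[' || ch == '{' then
        pvTks rest (cur ++ [if depth == 0 then ch else '#']) (depth + 1) none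
      else if ch == ')' || ch == ']' || ch == '}' then
        pvTks rest (cur ++ ['#']) (depth - 1) none
      else if depth == 0 && PySem.Chars.isspace ch then
        (if cur.isEmpty then pvTks rest [] depth none else cur :: pvTks rest [] depth none)
      else pvTks rest (cur ++ [if depth == 0 then ch else '#']) depth none
termination_by l _ _ _ => l.length
decreasing_by all_goals (simp [List.length_tail]; try omega)

-- B's foldl over single chars computes the recursive tokenizer.
theorem pvBridge : ∀ (l : List Char) (tokens : List (List Char)) (cur : List Char)
    (depth : Int) (quote : Option Char),
    ((l.foldl pvTokStep (tokens, cur, depth, quote, false)).1 ++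
      (if (l.foldl pvTokStep (tokens, cur, depth, quote, false)).2.1.isEmpty then []
       else [(l.foldl pvTokStep (tokens, cur, depth, quote, false)).2.1])) =
      tokens ++ pvTks l cur depth quote := by
  intro l tokens cur depth quote
  induction l, cur, depth, quote using pvTks.induct generalizing tokens
  all_goals try (simp_all [pvTks, pvTokStep, List.foldl_cons]; done)
  case case3 =>
    rename_i ch rest cur depth q h ih
    rw [Bool.and_eq_true, beq_iff_eq] at h
    obtain ⟨hc, hr⟩ := h
    subst hc
    cases rest with
    | nil => simp at hr
    | cons c2 r2 => simp_all [pvTks, pvTokStep, List.foldl_cons]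
  case case4 =>
    rename_i ch rest cur depth q h1 h ih
    rw [beq_iff_eq] at h
    subst h
    by_cases hq : ch = '\\'
    · subst hq
      have hr : rest = [] := by simpa [List.isEmpty_iff] using h1
      subst hr
      simp [pvTks, pvTokStep, List.foldl_cons]
    · simp_all [pvTks, pvTokStep, List.foldl_cons]
  case case5 =>
    rename_i ch rest cur depth q h1 h ih
    by_cases hb : ch = '\\'
    · subst hb
      have hr : rest = [] := by simpa [List.isEmpty_iff] using h1
      subst hr
      simp_all [pvTks, pvTokStep, List.foldl_cons]
    · simp_all [pvTks, pvTokStep, List.foldl_cons]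
  case case11 =>
    rename_i ch rest cur depth h1 h2 h3 h4 ih
    by_cases hd : (depth == 0) = true <;>
      simp_all [pvTks, pvTokStep, List.foldl_cons]

def pvBraceHead (u : List Char) : Bool :=
  match u with
  | c :: _ => c == '(' || c == '{'
  | [] => false

def pvTokMatch (op t : List Char) : Bool :=
  (t == op) || (PySem.Chars.startswith t op && pvBraceHead (t.drop op.length))

theorem pvBraceAt_eq (t : List Char) (n : Nat) : pvBraceAt t n = pvBraceHead (t.drop n) := by
  have h : PySem.Chars.pyGet? t (n : Int) = (t.drop n).head? := by
    simp [pysem, List.head?_drop]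
  unfold pvBraceAt pvBraceHead
  rw [h]
  cases t.drop n <;> simp

theorem pvTokCheck_eq (t : List Char) :
    pvTokCheck t = pvSetOps.any fun op => pvTokMatch op t := by
  simp only [pvTokCheck, pvTokMatch, pvBraceAt_eq]

-- a char the scanner passes through unchanged at top level outside quotes
abbrev pvPlain (c : Char) : Prop :=
  c ≠ '"' ∧ c ≠ '\'' ∧ c ≠ '(' ∧ c ≠ '[' ∧ c ≠ '{' ∧ c ≠ ')' ∧ c ≠ ']' ∧ c ≠ '}' ∧
  c ≠ '#' ∧ PySem.Chars.isspace c = false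

theorem tm_nil (a : Char) (op' : List Char) : pvTokMatch (a::op') [] = false := by
  simp [pvTokMatch, pvBraceHead, PySem.Chars.startswith]

theorem tm_cons_ne {a m : Char} (op' t : List Char) (h : m ≠ a) :
    pvTokMatch (a::op') (m::t) = false := by
  simp [pvTokMatch, PySem.Chars.startswith, List.isPrefixOf_cons₂, h, Ne.symm h]

theorem tm_cons_cons (a : Char) (op' t : List Char) :
    pvTokMatch (a::op') (a::t) = pvTokMatch op' t := by
  simp [pvTokMatch, PySem.Chars.startswith, pvBraceHead]

theorem chunk_shape (c : Char) (r : List Char) :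
    pvChunk (c::r) 0 none = [] ∨ (pvChunk (c::r) 0 none).head? = some c ∨
      (pvChunk (c::r) 0 none).head? = some '#' := by
  simp only [pvChunk]
  split_ifs <;> simp

theorem chunk_plain {c : Char} (h : pvPlain c) (r : List Char) :
    pvChunk (c::r) 0 none = c :: pvChunk r 0 none := by
  obtain ⟨h1,h2,h3,h4,h5,h6,h7,h8,h9,h10⟩ := h
  simp [pvChunk, h1,h2,h3,h4,h5,h6,h7,h8,h10]

theorem pvOpEq : ∀ (op l : List Char), (∀ c ∈ op, pvPlain c) →
    (PySem.Chars.startswith l op && pvTrailOK (l.drop op.length)) =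
      pvTokMatch op (pvChunk l 0 none) := by
  intro op
  induction op with
  | nil =>
    intro l _
    cases l with
    | nil => simp [pvTrailOK, pvTokMatch, pvChunk, PySem.Chars.startswith, pvBraceHead]
    | cons c r =>
      by_cases h1 : c = '"' ∨ c = '\''
      · rcases h1 with h|h <;> subst h <;>
          (simp [pvChunk, pvTrailOK, pvTokMatch, pvBraceHead, PySem.Chars.startswith]; decide)
      by_cases h2 : c = '(' ∨ c = '[' ∨ c = '{'
      · rcases h2 with h|h|h <;> subst h <;>
          (simp [pvChunk, pvTrailOK, pvTokMatch, pvBraceHead, PySem.Chars.startswith]; try decide)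
      by_cases h3 : c = ')' ∨ c = ']' ∨ c = '}'
      · rcases h3 with h|h|h <;> subst h <;>
          simp [pvChunk, pvTrailOK, pvTokMatch, pvBraceHead, PySem.Chars.startswith] <;> decide
      have hb1 : (c == '"' || c == '\'') = false := by
        rcases not_or.mp h1 with ⟨x, y⟩; simp [x, y]
      have hb2 : (c == '(' || c == '[' || c == '{') = false := by
        rcases not_or.mp h2 with ⟨x, z⟩; rcases not_or.mp z with ⟨y, w⟩; simp [x, y, w]
      have hb3 : (c == ')' || c == ']' || c == '}') = false := by
        rcases not_or.mp h3 with ⟨x, z⟩; rcases not_or.mp z with ⟨y, w⟩; simp [x, y, w]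
      by_cases hs : PySem.Chars.isspace c = true
      · simp [pvChunk, pvTrailOK, pvTokMatch, pvBraceHead, PySem.Chars.startswith,
          hb1, hb2, hb3, hs]
      · have hs' : PySem.Chars.isspace c = false := by simpa using hs
        simp [pvChunk, pvTrailOK, pvTokMatch, pvBraceHead, PySem.Chars.startswith,
          hb1, hb2, hb3, hs']
  | cons a op' ih =>
    intro l hplain
    have ha : pvPlain a := hplain a (by simp)
    obtain ⟨ha1,ha2,ha3,ha4,ha5,ha6,ha7,ha8,ha9,ha10⟩ := ha
    have hop' : ∀ c ∈ op', pvPlain c := fun c hc => hplain c (by simp [hc])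
    cases l with
    | nil => simp [PySem.Chars.startswith, pvChunk, tm_nil]
    | cons c r =>
      by_cases hca : c = a
      · subst hca
        rw [chunk_plain ⟨ha1,ha2,ha3,ha4,ha5,ha6,ha7,ha8,ha9,ha10⟩, tm_cons_cons]
        have := ih r hop'
        simpa [PySem.Chars.startswith, List.isPrefixOf_cons₂] using this
      · have hl : PySem.Chars.startswith (c::r) (a::op') = false := by
          simp [PySem.Chars.startswith, List.isPrefixOf_cons₂, Ne.symm hca]
        rw [hl, Bool.false_and]
        rcases chunk_shape c r with h0 | hh | hh
        · rw [h0, tm_nil]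
        · cases hcl : pvChunk (c::r) 0 none with
          | nil => simp [hcl] at hh
          | cons x xs =>
            rw [hcl] at hh
            simp only [List.head?_cons, Option.some.injEq] at hh
            subst hh
            rw [tm_cons_ne _ _ hca]
        · cases hcl : pvChunk (c::r) 0 none with
          | nil => simp [hcl] at hh
          | cons x xs =>
            rw [hcl] at hh
            simp only [List.head?_cons, Option.some.injEq] at hh
            subst hh
            rw [tm_cons_ne _ _ (Ne.symm ha9)]

theorem tokcheck_nil : pvTokCheck [] = false := by decide

theorem tokcheck_cons_ne (c : Char) (h : c ≠ 'a' ∧ c ≠ 'o' ∧ c ≠ 'u') (t : List Char) :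
    pvTokCheck (c::t) = false := by
  rw [pvTokCheck_eq]
  simp [pvSetOps, tm_cons_ne _ _ h.1, tm_cons_ne _ _ h.2.1, tm_cons_ne _ _ h.2.2]

theorem plain_and : ∀ c ∈ (['a','n','d'] : List Char), pvPlain c := by
  intro c hc; simp at hc; rcases hc with rfl|rfl|rfl <;> decide

theorem plain_or : ∀ c ∈ (['o','r'] : List Char), pvPlain c := by
  intro c hc; simp at hc; rcases hc with rfl|rfl <;> decide

theorem plain_unless : ∀ c ∈ (['u','n','l','e','s','s'] : List Char), pvPlain c := by
  intro c hc; simp at hc; rcases hc with rfl|rfl|rfl|rfl|rfl|rfl <;> decide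

theorem pvKey (l : List Char) : pvCheckOps l = pvTokCheck (pvChunk l 0 none) := by
  rw [pvTokCheck_eq]
  unfold pvCheckOps
  simp only [pvSetOps, List.any_cons, List.any_nil]
  rw [pvOpEq _ l plain_and, pvOpEq _ l plain_or, pvOpEq _ l plain_unless]

theorem pvMain : ∀ (l cur : List Char) (depth : Int) (quote : Option Char),
    (pvTks l cur depth quote).any pvTokCheck =
      (pvTokCheck (cur ++ pvChunk l depth quote) || pvLoopA l false depth quote) := by
  intro l cur depth quote
  induction l, cur, depth, quote using pvTks.induct
  all_goals try (simp_all [pvTks, pvChunk, pvLoopA, tokcheck_nil, pvKey]; done)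
  case case4 =>
    rename_i ch rest cur depth q h1 h ih
    rw [beq_iff_eq] at h
    subst h
    by_cases hq : ch = '\\'
    · subst hq
      have hr : rest = [] := by simpa [List.isEmpty_iff] using h1
      subst hr
      simp [pvTks, pvChunk, pvLoopA]
    · simp_all [pvTks, pvChunk, pvLoopA]
  case case5 =>
    rename_i ch rest cur depth q h1 h ih
    by_cases hb : ch = '\\'
    · subst hb
      have hr : rest = [] := by simpa [List.isEmpty_iff] using h1
      subst hr
      simp_all [pvTks, pvChunk, pvLoopA]
    · simp_all [pvTks, pvChunk, pvLoopA]
  case case11 =>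
    rename_i ch rest cur depth h1 h2 h3 h4 ih
    by_cases hd : (depth == 0) = true <;> simp_all [pvTks, pvChunk, pvLoopA]

theorem pvFull (l : List Char) :
    pvLoopA l true 0 none = (pvTks l [] 0 none).any pvTokCheck := by
  rw [pvMain]
  cases l with
  | nil => simp [pvChunk, pvLoopA, tokcheck_nil]
  | cons c r =>
    by_cases h1 : c = '"' ∨ c = '\''
    · rcases h1 with h|h <;> subst h
      · simp [pvLoopA, pvChunk, tokcheck_cons_ne '"' (by decide)]
      · simp [pvLoopA, pvChunk, tokcheck_cons_ne '\'' (by decide)]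
    by_cases h2 : c = '(' ∨ c = '[' ∨ c = '{'
    · rcases h2 with h|h|h <;> subst h
      · simp [pvLoopA, pvChunk, tokcheck_cons_ne '(' (by decide)]
      · simp [pvLoopA, pvChunk, tokcheck_cons_ne '[' (by decide)]
      · simp [pvLoopA, pvChunk, tokcheck_cons_ne '{' (by decide)]
    by_cases h3 : c = ')' ∨ c = ']' ∨ c = '}'
    · rcases h3 with h|h|h <;> subst h <;>
        simp [pvLoopA, pvChunk, tokcheck_cons_ne '#' (by decide)]
    have hb1 : (c == '"' || c == '\'') = false := by
      rcases not_or.mp h1 with ⟨x, y⟩; simp [x, y]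
    have hb2 : (c == '(' || c == '[' || c == '{') = false := by
      rcases not_or.mp h2 with ⟨x, z⟩; rcases not_or.mp z with ⟨y, w⟩; simp [x, y, w]
    have hb3 : (c == ')' || c == ']' || c == '}') = false := by
      rcases not_or.mp h3 with ⟨x, z⟩; rcases not_or.mp z with ⟨y, w⟩; simp [x, y, w]
    by_cases hs : PySem.Chars.isspace c = true
    · simp [pvLoopA, pvChunk, hb1, hb2, hb3, hs, tokcheck_nil]
    · have hs' : PySem.Chars.isspace c = false := by simpa using hs
      have hc : pvChunk (c::r) 0 none = c :: pvChunk r 0 none := by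
        simp [pvChunk, hb1, hb2, hb3, hs']
      simp only [pvLoopA, hb1, hb2, hb3, hs', List.nil_append]
      rw [hc, ← hc, ← pvKey]
      rcases hP : pvCheckOps (c::r) <;> simp [hP]

-- ===== VERDICT (by name: the statement is the Claim_ definition above) =====
theorem has_top_level_set_op_py_spec : Claim_equal_has_top_level_set_op_py := by
  intro expr _
  show has_top_level_set_op_py expr = has_top_level_set_op_py_alt expr
  simp only [has_top_level_set_op_py, has_top_level_set_op_py_alt]
  rw [pvBridge expr.toList [] [] 0 none, List.nil_append, pvFull]
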